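-- pv_equiv track=rewrite | github.com/timothyyu/ml_monorepo | DeepHyperNEAT/decode.py | gather_layers
-- ===== SOURCE A (Python) =====
-- def gather_layers(substrate):
--     '''
--     Takes a dictionary representation of a substrate and returns
--     a list of the layers and the sheets within those layers.
--
--     substrate -- dictionary representation of a substrate
--     '''
--     layers = {}
--     for i in range(len(substrate)):
--         layers[i] = []
--         for key in substrate.keys():
--             if key[0] == i and key not in layers[i]:
--                 layers[i].append(key)
--         if layers[i] == []:
--             del layers[i]
--     return layers
-- ===== SOURCE B (Python) =====
-- def gather_layers(substrate):
--     n = len(substrate)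
--     buckets = [[] for _ in range(n)]
--     seen = set()
--     for key in substrate:
--         i = key[0]
--         if 0 <= i < n and key not in seen:
--             seen.add(key)
--             buckets[i].append(key)
--     return {i: b for i, b in enumerate(buckets) if b}
-- ===== Notes on version B (the rewrite author's own statement) =====
-- stated objective: faster
-- what changed: A loops over all layer indices and rescans every key for each index (nested loops); B makes a single pass over the keys, bucketing each key by key[0] into a preallocated list of n buckets with a seen-set for dedup, then emits the occupied buckets in index order with one enumerate pass.
import Mathlib
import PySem

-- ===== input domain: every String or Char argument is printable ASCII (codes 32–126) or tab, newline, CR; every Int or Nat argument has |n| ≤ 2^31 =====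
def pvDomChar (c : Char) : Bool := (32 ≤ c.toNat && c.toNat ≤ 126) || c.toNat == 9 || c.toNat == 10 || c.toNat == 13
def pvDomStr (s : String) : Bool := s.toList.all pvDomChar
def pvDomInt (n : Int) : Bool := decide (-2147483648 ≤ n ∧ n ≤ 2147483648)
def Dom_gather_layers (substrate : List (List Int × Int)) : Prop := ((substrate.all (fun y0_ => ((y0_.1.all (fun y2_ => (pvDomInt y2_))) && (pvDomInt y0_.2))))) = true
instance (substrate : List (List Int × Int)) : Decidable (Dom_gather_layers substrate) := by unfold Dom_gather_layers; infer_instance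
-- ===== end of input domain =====

-- B replaces A's per-index rescan of all the keys (nested loops) by one bucketing pass over the
-- keys plus one emission pass over the buckets.
-- The substrate dict is the association list 'substrate'; both ports work on its distinct keys
-- in insertion order, as Python dict iteration does.

-- ===== PORT A =====
-- inner loop body: 'if key[0] == i and key not in layers[i]: layers[i].append(key)'
def glA_innerStep (i : Int) (layers : PySem.Dict Int (List (List Int))) (key : List Int) :
    PySem.Dict Int (List (List Int)) :=
  if (PySem.List.pyGet? key 0 == some i) && !((layers.getD i []).contains key) then
    layers.modify i [] (fun v => v ++ [key])
  else layers

-- outer loop body over 'i in range(len(substrate))': 'layers[i] = []', the inner loop,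
-- then 'if layers[i] == []: del layers[i]'
def glA_outer1 (ks : List (List Int)) (layers : PySem.Dict Int (List (List Int))) (i : Int) :
    PySem.Dict Int (List (List Int)) :=
  ks.foldl (glA_innerStep i) (layers.insert i [])

def glA_outerStep (ks : List (List Int)) (layers : PySem.Dict Int (List (List Int))) (i : Int) :
    PySem.Dict Int (List (List Int)) :=
  if (glA_outer1 ks layers i).getD i [] == ([] : List (List Int)) then (glA_outer1 ks layers i).erase i
  else glA_outer1 ks layers i

def gather_layers (substrate : List (List Int × Int)) : List (Int × List (List Int)) :=
  let ks := (PySem.Dict.ofList substrate).keys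
  let n : Int := (ks.length : Int)
  ((PySem.List.pyRange 0 n 1).foldl (glA_outerStep ks) PySem.Dict.empty).items

-- ===== PORT B =====
-- loop body: 'i = key[0]; if 0 <= i < n and key not in seen: seen.add(key); buckets[i].append(key)'
-- (on a zero-length key Python raises IndexError — outside Pre_; the port skips the key there)
def glB_step (n : Int) (st : List (List (List Int)) × PySem.Set (List Int)) (key : List Int) :
    List (List (List Int)) × PySem.Set (List Int) :=
  match PySem.List.pyGet? key 0 with
  | none => st
  | some i =>
    if (decide (0 ≤ i) && decide (i < n)) && !(PySem.Set.contains st.2 key) then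
      (PySem.List.pySetD st.1 i (PySem.List.pyGetD st.1 i [] ++ [key]), PySem.Set.add st.2 key)
    else st

-- '{i: b for i, b in enumerate(buckets) if b}': the enumerate keys are distinct and increasing,
-- so the comprehension's dict is exactly this filtered association list
def gather_layers_alt (substrate : List (List Int × Int)) : List (Int × List (List Int)) :=
  let ks := (PySem.Dict.ofList substrate).keys
  let n : Int := (ks.length : Int)
  let st := ks.foldl (glB_step n) (List.replicate ks.length ([] : List (List Int)), PySem.Set.empty)
  (PySem.List.enumerate st.1 0).filter (fun p => !p.2.isEmpty)

-- ===== PRECONDITION & SPEC =====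
-- Pre_ excludes exactly the inputs on which Python A raises IndexError: a substrate having a
-- zero-length tuple as a key ('key[0]' fails); B raises there as well.
def Pre_gather_layers (substrate : List (List Int × Int)) : Prop :=
  ∀ p ∈ substrate, p.1 ≠ []
instance (substrate : List (List Int × Int)) : Decidable (Pre_gather_layers substrate) := by
  unfold Pre_gather_layers; infer_instance
def pvWitness_gather_layers : (List (List Int × Int)) := [([0], 5), ([0, 1], 3), ([1, 0], 2)]

def Spec_gather_layers (substrate : List (List Int × Int)) (out : List (Int × List (List Int))) : Prop := out = gather_layers_alt substrate
instance (substrate : List (List Int × Int)) (out : List (Int × List (List Int))) : Decidable (Spec_gather_layers substrate out) := by unfold Spec_gather_layers; infer_instance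

-- ===== CLAIM (what is proved, stated in full; the proofs are below) =====
def Claim_equal_gather_layers : Prop := ∀ (substrate : List (List Int × Int)), Dom_gather_layers substrate → Pre_gather_layers substrate → Spec_gather_layers substrate (gather_layers substrate)

-- ===== LEMMAS AND PROOFS =====

-- the keys of the substrate whose first element is i, in insertion order
def glL (ks : List (List Int)) (i : Int) : List (List Int) :=
  ks.filter (fun k => PySem.List.pyGet? k 0 == some i)

def glC (ks : List (List Int)) (m : Nat) : List (Int × List (List Int)) :=
  ((List.range m).filter (fun j : Nat => !(glL ks (j : Int)).isEmpty)).map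
    (fun j : Nat => ((j : Int), glL ks (j : Int)))

theorem gl_get?_pre {pre : List (Int × List (List Int))} {i : Int} (h : ∀ q ∈ pre, q.1 ≠ i)
    (cur : List (List Int)) (rest : List (Int × List (List Int))) :
    (PySem.Dict.mk (pre ++ (i, cur) :: rest)).get? i = some cur := by
  induction pre with
  | nil => simp [PySem.Dict.get?]
  | cons q pre ih =>
    have hq : q.1 ≠ i := h q (by simp)
    simp only [List.cons_append]
    rw [PySem.Dict.get?_mk_cons]
    simp only [beq_iff_eq, if_neg hq]
    exact ih (fun q hq => h q (by simp [hq]))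

theorem gl_innerA {i : Int} {pre : List (Int × List (List Int))} (hpre : ∀ q ∈ pre, q.1 ≠ i) :
    ∀ (l : List (List Int)) (cur : List (List Int)), l.Nodup → (∀ k ∈ cur, k ∉ l) →
    l.foldl (glA_innerStep i) (PySem.Dict.mk (pre ++ [(i, cur)]))
      = PySem.Dict.mk (pre ++ [(i, cur ++ glL l i)]) := by
  intro l
  induction l with
  | nil => intro cur _ _; simp [glL]
  | cons k l ih =>
    intro cur hnd hcur
    have hget : (PySem.Dict.mk (pre ++ [(i, cur)])).getD i [] = cur := by
      simp [PySem.Dict.getD, gl_get?_pre hpre]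
    have hcontains : (PySem.Dict.mk (pre ++ [(i, cur)])).contains i = true := by
      simp [PySem.Dict.contains]
    simp only [List.foldl_cons]
    by_cases hk : (PySem.List.pyGet? k 0 == some i) = true
    · have hkcur : cur.contains k = false := by
        by_contra hc
        have : k ∈ cur := by
          simpa using (Bool.not_eq_false _).mp hc
        exact hcur k this (by simp)
      have hstep : glA_innerStep i (PySem.Dict.mk (pre ++ [(i, cur)])) k
          = PySem.Dict.mk (pre ++ [(i, cur ++ [k])]) := by
        unfold glA_innerStep PySem.Dict.modify
        rw [hget]
        simp only [hk, hkcur, Bool.not_false, Bool.and_true, if_true]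
        apply PySem.Dict.ext
        rw [PySem.Dict.items_insert_of_contains _ _ hcontains]
        rw [List.map_append]
        congr 1
        · conv_rhs => rw [← List.map_id pre]
          apply List.map_congr_left
          intro q hq
          simp [show q.1 ≠ i from hpre q hq]
        · simp
      rw [hstep, ih (cur ++ [k]) hnd.of_cons ?_]
      · congr 3
        simp [glL, hk]
      · intro k' hk'
        rcases List.mem_append.mp hk' with h1 | h2
        · exact fun hm => hcur k' h1 (by simp [hm])
        · simp at h2; subst h2
          exact (List.nodup_cons.mp hnd).1
    · have hstep : glA_innerStep i (PySem.Dict.mk (pre ++ [(i, cur)])) k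
          = PySem.Dict.mk (pre ++ [(i, cur)]) := by
        unfold glA_innerStep
        simp [hk]
      rw [hstep, ih cur hnd.of_cons (fun k' h1 hm => hcur k' h1 (by simp [hm]))]
      congr 3
      simp [glL, hk]

theorem glC_keys_lt (ks : List (List Int)) (m : Nat) :
    ∀ q ∈ glC ks m, q.1 < (m : Int) := by
  intro q hq
  unfold glC at hq
  obtain ⟨j, hj1, rfl⟩ := List.mem_map.mp hq
  have hj2 := List.mem_range.mp (List.mem_filter.mp hj1).1
  simp only []
  exact_mod_cast hj2

theorem gl_outerA (ks : List (List Int)) (hnd : ks.Nodup) :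
    ∀ (m : Nat),
    (PySem.List.pyRange 0 (m : Int) 1).foldl (glA_outerStep ks) PySem.Dict.empty
      = PySem.Dict.mk (glC ks m) := by
  intro m
  induction m with
  | zero => simp [glC, PySem.Dict.empty]
  | succ m ih =>
    have hm : ((m : Int) + 1) = ((m + 1 : Nat) : Int) := by push_cast; ring
    rw [← hm, PySem.List.pyRange_one_succ_right (by positivity), List.foldl_append, ih]
    simp only [List.foldl_cons, List.foldl_nil]
    have hkeys : ∀ q ∈ glC ks m, q.1 ≠ (m : Int) := by
      intro q hq
      have := glC_keys_lt ks m q hq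
      omega
    -- the insert appends a fresh key m
    have hnc : (PySem.Dict.mk (glC ks m)).contains (m : Int) = false := by
      simp only [PySem.Dict.contains, List.any_eq_false]
      intro q hq
      simpa using hkeys q hq
    unfold glA_outerStep
    have h1 : glA_outer1 ks (PySem.Dict.mk (glC ks m)) (m : Int)
        = PySem.Dict.mk (glC ks m ++ [((m : Int), glL ks (m : Int))]) := by
      unfold glA_outer1
      rw [show (PySem.Dict.mk (glC ks m)).insert (m : Int) [] = PySem.Dict.mk (glC ks m ++ [((m : Int), [])]) from by
        apply PySem.Dict.ext
        rw [PySem.Dict.items_insert_of_not_contains _ _ hnc]]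
      rw [gl_innerA hkeys ks [] hnd (by simp)]
      simp only [List.nil_append]
    rw [h1]
    have hgd : (PySem.Dict.mk (glC ks m ++ [((m : Int), glL ks (m : Int))])).getD (m : Int) [] = glL ks (m : Int) := by
      simp [PySem.Dict.getD, gl_get?_pre hkeys]
    rw [hgd]
    have hrange : glC ks (m + 1)
        = glC ks m ++ (if (glL ks (m : Int)).isEmpty then [] else [((m : Int), glL ks (m : Int))]) := by
      unfold glC
      rw [List.range_succ, List.filter_append, List.map_append]
      congr 1
      by_cases he : (glL ks (m : Int)).isEmpty <;> simp [he]
    by_cases he : glL ks (m : Int) = []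
    · rw [if_pos (by simp [he])]
      apply PySem.Dict.ext
      unfold PySem.Dict.erase
      rw [List.filter_append]
      rw [hrange]
      simp only [he, List.isEmpty_nil, if_true, List.append_nil]
      rw [List.filter_eq_self.mpr (fun q hq => by simpa using hkeys q hq)]
      simp
    · rw [if_neg (by simpa using he)]
      rw [hrange, if_neg (by simpa using he)]

theorem gl_innerB (n : Int) :
    ∀ (l : List (List Int)) (bk : List (List (List Int))) (sn : PySem.Set (List Int)),
    l.Nodup → (∀ k, PySem.Set.contains sn k = true → k ∉ l) → ((bk.length : Int) = n) →
    (l.foldl (glB_step n) (bk, sn)).1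
      = bk.mapIdx (fun j b => b ++ glL l (j : Int)) := by
  intro l
  induction l with
  | nil =>
    intro bk sn _ _ _
    simp only [List.foldl_nil, glL, List.filter_nil, List.append_nil]
    symm
    rw [List.mapIdx_eq_iff]
    intro i
    cases h : bk[i]? <;> simp
  | cons k l ih =>
    intro bk sn hnd hsn hlen
    simp only [List.foldl_cons]
    have hfc : ∀ (j : Nat) (b : List (List Int)) (hk : (PySem.List.pyGet? k 0 == some (j : Int)) = true),
        glL (k :: l) (j : Int) = k :: glL l (j : Int) := by
      intro j b hk; simp [glL, hk]
    by_cases hnone : PySem.List.pyGet? k 0 = none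
    · have hstep : glB_step n (bk, sn) k = (bk, sn) := by
        unfold glB_step; rw [hnone]
      rw [hstep, ih bk sn hnd.of_cons (fun k' h hm => hsn k' h (by simp [hm])) hlen]
      apply List.ext_getElem (by simp) ?_
      intro j h1 h2
      simp only [List.getElem_mapIdx]
      congr 1
      simp [glL, List.filter_cons, Option.ne_none_iff_exists'.mp, hnone]
    · obtain ⟨i, hi⟩ := Option.ne_none_iff_exists'.mp hnone
      have hsk : PySem.Set.contains sn k = false := by
        by_contra hc
        exact hsn k ((Bool.not_eq_false _).mp hc) (by simp)
      by_cases hr : 0 ≤ i ∧ i < n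
      · have hstep : glB_step n (bk, sn) k
            = (bk.set i.toNat (bk[i.toNat]! ++ [k]), PySem.Set.add sn k) := by
          unfold glB_step
          rw [hi]
          simp only [hr.1, hr.2, decide_true, Bool.and_self, hsk, Bool.not_false, Bool.and_true,
            if_true]
          rw [PySem.List.pySetD_of_nonneg _ _ hr.1,
            PySem.List.pyGetD_eq_getElem _ _ hr.1 (by omega)]
          simp [List.getElem!_eq_getElem?_getD, List.getElem?_eq_getElem (by omega : i.toNat < bk.length)]
        rw [hstep, ih _ _ hnd.of_cons ?_ (by simp [hlen])]
        · apply List.ext_getElem (by simp) ?_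
          intro j h1 h2
          simp only [List.getElem_mapIdx, List.getElem_set]
          by_cases hj : i.toNat = j
          · subst hj
            rw [if_pos rfl]
            have hk : (PySem.List.pyGet? k 0 == some ((i.toNat : Nat) : Int)) = true := by
              simp [hi, Int.toNat_of_nonneg hr.1]
            rw [hfc i.toNat bk[i.toNat] hk]
            simp only [List.getElem!_eq_getElem?_getD]
            rw [List.getElem?_eq_getElem (by simpa using h2)]
            simp
          · rw [if_neg hj]
            congr 1
            have : ¬ (PySem.List.pyGet? k 0 == some (j : Int)) = true := by
              simp [hi]
              omega
            simp [glL, this]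
        · intro k' h hm
          have hmem : k' ∈ sn.add k := by
            simpa [PySem.Set.contains] using h
          rcases (PySem.Set.mem_add sn k k').mp hmem with h1 | h2
          · exact hsn k' (by simpa [PySem.Set.contains] using h1) (by simp [hm])
          · subst h2; exact (List.nodup_cons.mp hnd).1 hm
      · have hstep : glB_step n (bk, sn) k = (bk, sn) := by
          unfold glB_step
          rw [hi]
          have : (decide (0 ≤ i) && decide (i < n)) = false := by
            rcases (not_and_or.mp hr) with h | h <;> simp [h]
          simp [this]
        rw [hstep, ih bk sn hnd.of_cons (fun k' h hm => hsn k' h (by simp [hm])) hlen]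
        apply List.ext_getElem (by simp) ?_
        intro j h1 h2
        simp only [List.getElem_mapIdx]
        congr 1
        have : ¬ (PySem.List.pyGet? k 0 == some (j : Int)) = true := by
          simp only [hi, beq_iff_eq, Option.some.injEq]
          intro hij
          apply hr
          have hjlen : j < bk.length := by simpa using h2
          constructor
          · omega
          · rw [hij, ← hlen]; exact_mod_cast hjlen
        simp [glL, this]

theorem gl_enum_filter (f : Nat → List (List Int)) : ∀ n : Nat,
    List.filter (fun p => !p.2.isEmpty) (PySem.List.enumerate ((List.range n).map (fun j : Nat => f j)) 0)
    = ((List.range n).filter (fun j : Nat => !(f j).isEmpty)).map (fun j : Nat => ((j : Int), f j)) := by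
  intro n
  induction n with
  | zero => simp
  | succ n ih =>
    rw [List.range_succ, List.map_append, PySem.List.enumerate_append, List.filter_append, ih,
      List.filter_append, List.map_append]
    congr 1
    by_cases he : (f n).isEmpty <;> simp [PySem.List.enumerate, he]

theorem gather_layers_eq (substrate : List (List Int × Int)) :
    gather_layers substrate = gather_layers_alt substrate := by
  unfold gather_layers gather_layers_alt
  dsimp only []
  have hnd : ((PySem.Dict.ofList substrate).keys).Nodup := PySem.Dict.nodup_keys_ofList substrate
  set ks := (PySem.Dict.ofList substrate).keys with hks
  rw [gl_outerA ks hnd ks.length]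
  rw [gl_innerB (ks.length : Int) ks (List.replicate ks.length []) PySem.Set.empty hnd
    (by intro k h; simp [PySem.Set.contains, PySem.Set.empty] at h) (by simp)]
  -- buckets = (range n).map (glL ks ·)
  have hbk : (List.replicate ks.length ([] : List (List Int))).mapIdx (fun j b => b ++ glL ks (j : Int))
      = (List.range ks.length).map (fun j : Nat => glL ks (j : Int)) := by
    apply List.ext_getElem (by simp)
    intro j h1 h2
    simp [List.getElem_mapIdx]
  rw [hbk, gl_enum_filter]
  rfl

-- ===== VERDICT (by name: the statement is the Claim_ definition above) =====
theorem gather_layers_spec : Claim_equal_gather_layers := by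
  intro substrate _ _
  unfold Spec_gather_layers
  exact gather_layers_eq substrate
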